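-- pv_equiv track=rewrite | github.com/wangyu-ovo/CREBench | CREBench/Square/python_implementation/square_128_ecb.py | _square_transform
-- ===== SOURCE A (Python) =====
-- _MOD = 0xF5
--
-- def _gmul(a: int, b: int) -> int:
--     product = 0
--     for _ in range(8):
--         if b & 1:
--             product ^= a
--         hi_bit_set = a & 0x80
--         a = (a << 1) & 0xFF
--         if hi_bit_set:
--             a ^= _MOD
--         b >>= 1
--     return product
--
-- def _get_byte(word: int, index: int) -> int:
--     return (word >> (index * 8)) & 0xFF
--
-- def _square_transform(words: list[int]) -> list[int]:
--     out = [0] * 4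
--     for i in range(4):
--         word = words[i]
--         temp = 0
--         for j in range(4):
--             result_byte = 0
--             for k in range(4):
--                 input_byte = _get_byte(word, 3 - k)
--                 result_byte ^= _gmul(input_byte, ((2, 1, 1, 3), (3, 2, 1, 1), (1, 3, 2, 1), (1, 1, 3, 2))[k][j])
--             temp |= result_byte << ((3 - j) * 8)
--         out[i] = temp
--     return out
-- ===== SOURCE B (Python) =====
-- _MOD = 0xF5
--
--
-- def _xtime(a: int) -> int:
--     # multiply by 2 in GF(2^8) with the module's (nonstandard) modulus 0xF5
--     return ((a << 1) & 0xFF) ^ (_MOD if a & 0x80 else 0)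
--
--
-- def _m3(a: int) -> int:
--     # multiply by 3 = a * (2 ^ 1)
--     return a ^ _xtime(a)
--
--
-- def _mix(word: int) -> int:
--     s0 = (word >> 24) & 0xFF
--     s1 = (word >> 16) & 0xFF
--     s2 = (word >> 8) & 0xFF
--     s3 = word & 0xFF
--     t0 = _xtime(s0) ^ _m3(s1) ^ s2 ^ s3
--     t1 = s0 ^ _xtime(s1) ^ _m3(s2) ^ s3
--     t2 = s0 ^ s1 ^ _xtime(s2) ^ _m3(s3)
--     t3 = _m3(s0) ^ s1 ^ s2 ^ _xtime(s3)
--     return (t0 << 24) | (t1 << 16) | (t2 << 8) | t3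
--
--
-- def _square_transform(words: list[int]) -> list[int]:
--     return [_mix(words[0]), _mix(words[1]), _mix(words[2]), _mix(words[3])]
-- ===== Notes on version B (the rewrite author's own statement) =====
-- stated objective: simpler
-- what changed: B replaces the generic 8-round bit-serial GF(2^8) multiplier and the nested 4x4 matrix j/k loops with closed-form per-byte expressions (xtime and times-3 helpers), computing each output byte as a direct XOR chain and packing the four bytes directly.
import Mathlib
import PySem

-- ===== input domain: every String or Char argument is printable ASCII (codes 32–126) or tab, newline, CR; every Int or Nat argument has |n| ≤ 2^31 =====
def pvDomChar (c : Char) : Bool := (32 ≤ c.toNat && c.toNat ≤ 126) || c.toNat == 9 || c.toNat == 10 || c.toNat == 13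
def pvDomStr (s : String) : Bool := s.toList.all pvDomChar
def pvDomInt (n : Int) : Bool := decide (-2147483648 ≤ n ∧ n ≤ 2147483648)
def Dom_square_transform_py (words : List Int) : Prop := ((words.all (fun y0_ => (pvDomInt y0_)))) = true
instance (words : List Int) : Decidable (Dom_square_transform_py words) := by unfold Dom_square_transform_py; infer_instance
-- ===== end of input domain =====

-- B replaces the generic bit-serial GF(2^8) multiplier and the nested matrix loops
-- by closed-form xtime / times-3 byte expressions per output byte (objective: simpler).


-- ===== PORT A =====
-- _gmul: 8-round bit-serial GF(2^8) multiply; loop body over state (product, a, b)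
def pvGmulStep (st : Int × Int × Int) : Int × Int × Int :=
  let product := if PySem.Int.band st.2.2 1 ≠ 0 then PySem.Int.bxor st.1 st.2.1 else st.1
  let hi := PySem.Int.band st.2.1 0x80
  let a1 := PySem.Int.band (st.2.1 <<< 1) 0xFF
  let a2 := if hi ≠ 0 then PySem.Int.bxor a1 0xF5 else a1
  (product, a2, st.2.2 >>> 1)

def pvGmul (a b : Int) : Int :=
  ((PySem.List.pyRange 0 8 1).foldl (fun st _ => pvGmulStep st) (0, a, b)).1

-- _get_byte(word, index); the shift amount index*8 is nonnegative at every call site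
def pvGetByte (word index : Int) : Int :=
  PySem.Int.band (word >>> (index * 8).toNat) 0xFF

def pvMat : List (List Int) := [[2,1,1,3],[3,2,1,1],[1,3,2,1],[1,1,3,2]]

-- body of A's outer loop: the j/k double loop computing `temp` for one word
def pvWordTemp (word : Int) : Int :=
  (List.range 4).foldl (fun temp (j : Nat) =>
    let rb := (List.range 4).foldl (fun rb (k : Nat) =>
      PySem.Int.bxor rb (pvGmul (pvGetByte word (3 - (k : Int))) ((pvMat.getD k []).getD j 0))) 0
    PySem.Int.bor temp (rb <<< ((3 - j) * 8))) 0

-- words[i] (Python raises IndexError when i is out of range: excluded by Pre_, .getD 0 is never reached there)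
def square_transform_py (words : List Int) : List Int :=
  (List.range 4).foldl (fun out (i : Nat) =>
    out.set i (pvWordTemp ((PySem.List.pyGet? words (i : Int)).getD 0))) [0, 0, 0, 0]

-- ===== PORT B =====
def pvXtime (a : Int) : Int :=
  PySem.Int.bxor (PySem.Int.band (a <<< 1) 0xFF) (if PySem.Int.band a 0x80 ≠ 0 then 0xF5 else 0)

def pvM3 (a : Int) : Int := PySem.Int.bxor a (pvXtime a)

def pvMix (word : Int) : Int :=
  let s0 := PySem.Int.band (word >>> (24 : Nat)) 0xFF
  let s1 := PySem.Int.band (word >>> (16 : Nat)) 0xFF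
  let s2 := PySem.Int.band (word >>> (8 : Nat)) 0xFF
  let s3 := PySem.Int.band word 0xFF
  let t0 := PySem.Int.bxor (PySem.Int.bxor (PySem.Int.bxor (pvXtime s0) (pvM3 s1)) s2) s3
  let t1 := PySem.Int.bxor (PySem.Int.bxor (PySem.Int.bxor s0 (pvXtime s1)) (pvM3 s2)) s3
  let t2 := PySem.Int.bxor (PySem.Int.bxor (PySem.Int.bxor s0 s1) (pvXtime s2)) (pvM3 s3)
  let t3 := PySem.Int.bxor (PySem.Int.bxor (PySem.Int.bxor (pvM3 s0) s1) s2) (pvXtime s3)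
  PySem.Int.bor (PySem.Int.bor (PySem.Int.bor (t0 <<< (24 : Nat)) (t1 <<< (16 : Nat))) (t2 <<< (8 : Nat))) t3

def square_transform_py_alt (words : List Int) : List Int :=
  [pvMix ((PySem.List.pyGet? words 0).getD 0),
   pvMix ((PySem.List.pyGet? words 1).getD 0),
   pvMix ((PySem.List.pyGet? words 2).getD 0),
   pvMix ((PySem.List.pyGet? words 3).getD 0)]

-- ===== PRECONDITION & SPEC =====
-- Python A (and Python B alike) raises IndexError when fewer than 4 words are given; exactly those inputs are excluded.
def Pre_square_transform_py (words : List Int) : Prop := 4 ≤ words.length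
instance (words : List Int) : Decidable (Pre_square_transform_py words) := by unfold Pre_square_transform_py; infer_instance
def pvWitness_square_transform_py : List Int := [1, 2, 3, 4]

def Spec_square_transform_py (words : List Int) (out : List Int) : Prop := out = square_transform_py_alt words
instance (words : List Int) (out : List Int) : Decidable (Spec_square_transform_py words out) := by unfold Spec_square_transform_py; infer_instance

-- ===== CLAIM (what is proved, stated in full; the proofs are below) =====
def Claim_equal_square_transform_py : Prop := ∀ (words : List Int), Dom_square_transform_py words → Pre_square_transform_py words → Spec_square_transform_py words (square_transform_py words)

-- ===== LEMMAS AND PROOFS =====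

def pvTail6 : List Int := [2, 3, 4, 5, 6, 7]

theorem pvRange8 : PySem.List.pyRange 0 8 1 = 0 :: 1 :: pvTail6 := by decide

theorem pvZeroBxor (x : Int) : PySem.Int.bxor 0 x = x := by
  rw [PySem.Int.bxor_comm, PySem.Int.bxor_zero]

theorem pvZeroBor (x : Int) : PySem.Int.bor 0 x = x := by
  rw [PySem.Int.bor_comm, PySem.Int.bor_zero]

-- once b has become 0, the remaining rounds never change the product component
theorem pvProdB0 (l : List Int) : ∀ (p a : Int),
    ((l.foldl (fun st _ => pvGmulStep st) (p, a, 0)).1 = p) := by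
  induction l with
  | nil => intro p a; rfl
  | cons x xs ih =>
    intro p a
    simp only [List.foldl_cons]
    have hstep : pvGmulStep (p, a, 0) =
        (p, (if PySem.Int.band a 0x80 ≠ 0 then
              PySem.Int.bxor (PySem.Int.band (a <<< 1) 0xFF) 0xF5
            else PySem.Int.band (a <<< 1) 0xFF), 0) := by
      simp [pvGmulStep, show PySem.Int.band (0:Int) 1 = 0 from by decide,
        show ((0:Int) >>> 1) = 0 from by decide]
    rw [hstep, ih]

def pvA1 (a : Int) : Int :=
  if PySem.Int.band a 0x80 ≠ 0 then PySem.Int.bxor (PySem.Int.band (a <<< 1) 0xFF) 0xF5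
  else PySem.Int.band (a <<< 1) 0xFF

theorem pvStep (p a b : Int) : pvGmulStep (p, a, b) =
    ((if PySem.Int.band b 1 ≠ 0 then PySem.Int.bxor p a else p), pvA1 a, b >>> 1) := rfl

theorem pvA1_eq (a : Int) : pvA1 a = pvXtime a := by
  by_cases h : PySem.Int.band a 0x80 = 0 <;>
    simp [pvA1, pvXtime, h, PySem.Int.bxor_zero]

theorem pvProdB0' (l : List Int) (p a : Int) :
    ((l.foldl (fun st (_ : Int) => pvGmulStep st) (p, a, 0)).1 = p) := pvProdB0 l p a

theorem pvGmul_one (a : Int) : pvGmul a 1 = a := by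
  unfold pvGmul
  rw [pvRange8]
  simp only [List.foldl_cons, pvStep,
    show PySem.Int.band (1:Int) 1 = 1 from by decide,
    show ((1:Int) >>> 1) = 0 from by decide,
    show PySem.Int.band (0:Int) 1 = 0 from by decide,
    show ((0:Int) >>> 1) = 0 from by decide]
  simp only [ne_eq, one_ne_zero, not_false_eq_true, if_true, not_true_eq_false, if_false]
  rw [pvProdB0', pvZeroBxor]

theorem pvGmul_two (a : Int) : pvGmul a 2 = pvXtime a := by
  unfold pvGmul
  rw [pvRange8]
  simp only [List.foldl_cons, pvStep,
    show PySem.Int.band (2:Int) 1 = 0 from by decide,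
    show ((2:Int) >>> 1) = 1 from by decide,
    show PySem.Int.band (1:Int) 1 = 1 from by decide,
    show ((1:Int) >>> 1) = 0 from by decide]
  simp only [ne_eq, one_ne_zero, not_false_eq_true, if_true, not_true_eq_false, if_false]
  rw [pvProdB0', pvZeroBxor, pvA1_eq]

theorem pvGmul_three (a : Int) : pvGmul a 3 = PySem.Int.bxor a (pvXtime a) := by
  unfold pvGmul
  rw [pvRange8]
  simp only [List.foldl_cons, pvStep,
    show PySem.Int.band (3:Int) 1 = 1 from by decide,
    show ((3:Int) >>> 1) = 1 from by decide,
    show PySem.Int.band (1:Int) 1 = 1 from by decide,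
    show ((1:Int) >>> 1) = 0 from by decide]
  simp only [ne_eq, one_ne_zero, not_false_eq_true, if_true]
  rw [pvProdB0', pvZeroBxor, pvA1_eq]

theorem pvWord_eq (w : Int) : pvWordTemp w = pvMix w := by
  unfold pvWordTemp
  rw [show List.range 4 = [0, 1, 2, 3] from rfl]
  simp only [List.foldl_cons, List.foldl_nil]
  norm_num [pvMat, pvGetByte,
    show Int.toNat 24 = 24 from rfl, show Int.toNat 16 = 16 from rfl,
    show Int.toNat 8 = 8 from rfl]
  simp only [pvGmul_one, pvGmul_two, pvGmul_three]
  simp only [pvZeroBxor, pvZeroBor]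
  simp only [pvMix, pvM3]

-- ===== VERDICT (by name: the statement is the Claim_ definition above) =====
theorem square_transform_py_spec : Claim_equal_square_transform_py := by
  intro words _ hpre
  unfold Pre_square_transform_py at hpre
  match words with
  | w0 :: w1 :: w2 :: w3 :: rest =>
    show square_transform_py _ = square_transform_py_alt _
    have g : ∀ (n : Nat), PySem.List.pyGet? (w0 :: w1 :: w2 :: w3 :: rest) (n : Int) =
        (w0 :: w1 :: w2 :: w3 :: rest)[n]? := fun n =>
      PySem.List.pyGet?_natCast _ n
    unfold square_transform_py square_transform_py_alt
    rw [show List.range 4 = [0, 1, 2, 3] from rfl]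
    simp only [List.foldl_cons, List.foldl_nil]
    have g0 := g 0; have g1 := g 1; have g2 := g 2; have g3 := g 3
    norm_num at g0 g1 g2 g3
    simp [g1, g2, g3, pvWord_eq]
  | [] => simp at hpre
  | [_] => simp at hpre
  | [_, _] => simp at hpre
  | [_, _, _] => simp at hpre
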